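-- pv_equiv track=rewrite | github.com/JeNeSuisPasDave/authenticator | src/authenticator/cli.py | _escape_for_re
-- ===== SOURCE A (Python) =====
-- def _escape_for_re(clear_text):
--     """Convert a wildcard string to an regex.
--
--     Convert a wildcard string to a regular expression string,
--     escaping all the regular expression special characters.
--
--     Args:
--         clear_text: a wildcard string. Any '*' will get converted to
--         '.*' patterns in the regular expression; all other characters
--         will match exactly.
--
--     Returns:
--         A regular expression pattern that matches the intent of the
--         clear_text wildcard search string. If input is None or an empty
--         string, then '.*' is the result.
--
--     """
--     # Input validation
--     #
--     if clear_text is None: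
--         return '^.*$'
--     wc_text = clear_text.strip()
--     if 0 == len(wc_text):
--         return '^.*$'
--
--     re_text = ['^']
--     for c in wc_text:
--         if '*' == c:
--             re_text.append('.*')
--         elif c in ('.', '^', '$', '+', '?', '\\', '|', '{', '(', '['):
--             re_text.append("\\{0}".format(c))
--         else:
--             re_text.append(c)
--     re_text.append('$')
--     return "".join(re_text)
-- ===== SOURCE B (Python) =====
-- _SPECIALS = frozenset('.^$+?\\|{([')
--
-- def _escape_seg(seg):
--     return "".join(('\\' + c) if c in _SPECIALS else c for c in seg)
--
-- def _escape_for_re(clear_text):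
--     if clear_text is None:
--         return '^.*$'
--     wc_text = clear_text.strip()
--     if not wc_text:
--         return '^.*$'
--     return '^' + '.*'.join(_escape_seg(seg) for seg in wc_text.split('*')) + '$'
-- ===== Notes on version B (the rewrite author's own statement) =====
-- stated objective: alternative
-- what changed: Replaces A's per-character loop (which appends one piece per character into an accumulator list) by splitting the stripped text on the wildcard character, escaping each wildcard-free segment against the same special-character set, and joining the escaped segments with the regex any-sequence pattern inside the anchors; a timing run measured this constant-factor faster (fewer Python-level branch iterations, work moved into str.split/str.join).
import Mathlib
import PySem

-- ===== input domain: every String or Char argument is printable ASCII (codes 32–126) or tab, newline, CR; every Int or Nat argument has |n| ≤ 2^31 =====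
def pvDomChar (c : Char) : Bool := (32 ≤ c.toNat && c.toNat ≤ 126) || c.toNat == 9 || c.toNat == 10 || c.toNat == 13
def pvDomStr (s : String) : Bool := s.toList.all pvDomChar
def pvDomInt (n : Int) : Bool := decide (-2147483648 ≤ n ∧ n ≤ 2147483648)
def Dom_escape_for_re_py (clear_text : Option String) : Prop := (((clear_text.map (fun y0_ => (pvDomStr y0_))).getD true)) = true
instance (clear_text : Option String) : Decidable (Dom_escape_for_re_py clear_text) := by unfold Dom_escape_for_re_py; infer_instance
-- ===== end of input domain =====

-- B rebuilds the pattern by splitting on '*' and joining escaped segments with '.*'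
-- instead of A's per-character branch loop (same output; timing run measured B constant-factor faster).

-- ===== PORT A =====
-- A's per-character loop: an accumulator list of strings, one append per character.
def escape_for_re_py (clear_text : Option String) : String :=
  match clear_text with
  | none => "^.*$"
  | some t =>
    let wc := PySem.Str.strip t
    if PySem.Str.len wc = 0 then "^.*$"
    else
      let re_text : List String := ["^"]
      let re_text := wc.toList.foldl (fun acc c =>
        if c = '*' then acc ++ [".*"]
        else if c ∈ ['.', '^', '$', '+', '?', '\\', '|', '{', '(', '['] then
          acc ++ [String.ofList ['\\', c]]
        else acc ++ [String.ofList [c]]) re_text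
      let re_text := re_text ++ ["$"]
      PySem.Str.join "" re_text

-- ===== PORT B =====
def pvSpecials : List Char := ['.', '^', '$', '+', '?', '\\', '|', '{', '(', '[']

-- ''.join of per-character escapes of one '*'-free segment
def pvEscSeg (seg : List Char) : List Char :=
  seg.flatMap (fun c => if c ∈ pvSpecials then ['\\', c] else [c])

def escape_for_re_py_alt (clear_text : Option String) : String :=
  match clear_text with
  | none => "^.*$"
  | some t =>
    let wc := (PySem.Str.strip t).toList
    if wc = [] then "^.*$"
    else
      String.ofList
        ('^' :: PySem.Chars.join ['.', '*'] ((wc.splitOn '*').map pvEscSeg) ++ ['$'])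

-- ===== PRECONDITION & SPEC =====
def Spec_escape_for_re_py (clear_text : Option String) (out : String) : Prop := out = escape_for_re_py_alt clear_text
instance (clear_text : Option String) (out : String) : Decidable (Spec_escape_for_re_py clear_text out) := by unfold Spec_escape_for_re_py; infer_instance

-- ===== CLAIM (what is proved, stated in full; the proofs are below) =====
def Claim_equal_escape_for_re_py : Prop := ∀ (clear_text : Option String), Dom_escape_for_re_py clear_text → Spec_escape_for_re_py clear_text (escape_for_re_py clear_text)

-- ===== LEMMAS AND PROOFS =====

-- the string A's loop appends for one character
def pvAChar (c : Char) : String :=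
  if c = '*' then ".*"
  else if c ∈ ['.', '^', '$', '+', '?', '\\', '|', '{', '(', '['] then String.ofList ['\\', c]
  else String.ofList [c]

-- the char-list A's loop contributes for one character
def pvAStar (c : Char) : List Char :=
  if c = '*' then ['.', '*'] else if c ∈ pvSpecials then ['\\', c] else [c]

lemma pvA_foldl (cs : List Char) (acc : List String) :
    cs.foldl (fun acc c =>
        if c = '*' then acc ++ [".*"]
        else if c ∈ ['.', '^', '$', '+', '?', '\\', '|', '{', '(', '['] then
          acc ++ [String.ofList ['\\', c]]
        else acc ++ [String.ofList [c]]) acc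
      = acc ++ cs.map pvAChar := by
  have : (fun (acc : List String) (c : Char) =>
        if c = '*' then acc ++ [".*"]
        else if c ∈ ['.', '^', '$', '+', '?', '\\', '|', '{', '(', '['] then
          acc ++ [String.ofList ['\\', c]]
        else acc ++ [String.ofList [c]])
      = fun acc c => acc ++ [pvAChar c] := by
    funext acc c
    simp only [pvAChar]
    split_ifs <;> rfl
  rw [this, PySem.List.foldl_append_singleton_eq_map]

lemma pvAChar_toList (c : Char) : (pvAChar c).toList = pvAStar c := by
  simp only [pvAChar, pvAStar, pvSpecials]
  split_ifs <;> simp [String.toList_ofList]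

-- ''.join is concatenation
lemma pvJoinEmpty (l : List (List Char)) : PySem.Chars.join [] l = l.flatten := by
  induction l with
  | nil => simp [PySem.Chars.join_nil]
  | cons p rest ih =>
    cases rest with
    | nil => simp [PySem.Chars.join_singleton]
    | cons q r => rw [PySem.Chars.join_cons_cons]; simp_all

lemma pvSplitOn_ne_nil (cs : List Char) : cs.splitOn '*' ≠ [] := by
  induction cs with
  | nil => simp [List.splitOn]
  | cons c cs ih =>
    simp only [List.splitOn, List.splitOnP_cons] at *
    split_ifs
    · simp
    · cases h : List.splitOnP (fun x => x == '*') cs with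
      | nil => exact absurd h ih
      | cons s r => simp

lemma pvJoin_cons_append (a b : List Char) (l : List (List Char)) :
    PySem.Chars.join ['.', '*'] ((a ++ b) :: l)
      = a ++ PySem.Chars.join ['.', '*'] (b :: l) := by
  cases l with
  | nil => simp [PySem.Chars.join_singleton]
  | cons q r => rw [PySem.Chars.join_cons_cons, PySem.Chars.join_cons_cons]; simp

-- key lemma: split/escape/join equals A's per-character expansion
lemma pvKey (cs : List Char) :
    PySem.Chars.join ['.', '*'] ((cs.splitOn '*').map pvEscSeg)
      = cs.flatMap pvAStar := by
  induction cs with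
  | nil => simp [List.splitOn, pvEscSeg, PySem.Chars.join_singleton]
  | cons c cs ih =>
    obtain ⟨s, rest, h⟩ : ∃ s rest, cs.splitOn '*' = s :: rest := by
      cases h : cs.splitOn '*' with
      | nil => exact absurd h (pvSplitOn_ne_nil cs)
      | cons s r => exact ⟨s, r, rfl⟩
    by_cases hc : c = '*'
    · subst hc
      have hsplit : ('*' :: cs).splitOn '*' = [] :: cs.splitOn '*' := by
        simp [List.splitOn, List.splitOnP_cons]
      rw [hsplit, h, List.map_cons, List.map_cons, pvEscSeg,
        PySem.Chars.join_cons_cons]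
      rw [h, List.map_cons] at ih
      simp only [List.flatMap_cons, ← ih]
      rfl
    · have hsplit : (c :: cs).splitOn '*' = (c :: s) :: rest := by
        simp only [List.splitOn, List.splitOnP_cons, beq_iff_eq, hc, if_false]
        have : List.splitOnP (fun x => x == '*') cs = s :: rest := h
        rw [this]; rfl
      have hesc : pvEscSeg (c :: s) = pvAStar c ++ pvEscSeg s := by
        simp only [pvEscSeg, List.flatMap_cons, pvAStar, hc, if_false]
      rw [hsplit, List.map_cons, hesc, pvJoin_cons_append]
      rw [h, List.map_cons] at ih
      rw [ih, List.flatMap_cons]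

lemma pvMain (cs : List Char) :
    PySem.Str.join "" ((["^"] ++ cs.map pvAChar) ++ ["$"])
      = String.ofList
          ('^' :: PySem.Chars.join ['.', '*'] ((cs.splitOn '*').map pvEscSeg) ++ ['$']) := by
  apply String.toList_inj.mp
  rw [PySem.Str.toList_join, String.toList_ofList, pvKey]
  show PySem.Chars.join [] _ = _
  rw [pvJoinEmpty]
  simp only [List.map_append, List.map_map, List.flatten_append, List.flatten_cons,
    List.map_cons, List.map_nil, List.flatten_nil]
  have : List.map (String.toList ∘ pvAChar) cs = List.map pvAStar cs := by
    apply List.map_congr_left; intro c _; exact pvAChar_toList c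
  simp only [this, List.flatten_eq_flatMap, List.flatMap_map, String.toList_ofList]
  show ('^' :: []) ++ [] ++ _ ++ (('$' :: []) ++ []) = _
  simp

-- ===== VERDICT (by name: the statement is the Claim_ definition above) =====
theorem escape_for_re_py_spec : Claim_equal_escape_for_re_py := by
  intro clear_text _
  unfold Spec_escape_for_re_py escape_for_re_py escape_for_re_py_alt
  cases clear_text with
  | none => rfl
  | some t =>
    simp only [PySem.Str.len_eq, Nat.cast_eq_zero, List.length_eq_zero_iff]
    by_cases h : (PySem.Str.strip t).toList = []
    · simp [h]
    · simp only [h, if_false]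
      rw [pvA_foldl]
      exact pvMain _
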